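-- pv_equiv track=rewrite | github.com/xdavid321/python_dashboard | collection/functions.py | split_headers
-- ===== SOURCE A (Python) =====
-- def split_headers(headers):
--     final_headers = []
--     for header in headers:
--         arr = header.split('__')
--         for x in range(0,len(arr)):
--             try:
--                 final_headers[x]
--             except:
--                 final_headers.append([])
--         for i, elem in enumerate(arr):
--             final_headers[i].append(elem)
--     return final_headers
-- ===== SOURCE B (Python) =====
-- def split_headers(headers):
--     arrs = [header.split('__') for header in headers]
--     maxlen = max((len(a) for a in arrs), default=0)
--     return [[a[i] for a in arrs if i < len(a)] for i in range(maxlen)]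
-- ===== Notes on version B (the rewrite author's own statement) =====
-- stated objective: simpler
-- what changed: A grows columns row by row (pad-with-[] then append element-wise); B splits all headers once, computes the maximum part count, and builds each column directly by a column-major gather.
import Mathlib
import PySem

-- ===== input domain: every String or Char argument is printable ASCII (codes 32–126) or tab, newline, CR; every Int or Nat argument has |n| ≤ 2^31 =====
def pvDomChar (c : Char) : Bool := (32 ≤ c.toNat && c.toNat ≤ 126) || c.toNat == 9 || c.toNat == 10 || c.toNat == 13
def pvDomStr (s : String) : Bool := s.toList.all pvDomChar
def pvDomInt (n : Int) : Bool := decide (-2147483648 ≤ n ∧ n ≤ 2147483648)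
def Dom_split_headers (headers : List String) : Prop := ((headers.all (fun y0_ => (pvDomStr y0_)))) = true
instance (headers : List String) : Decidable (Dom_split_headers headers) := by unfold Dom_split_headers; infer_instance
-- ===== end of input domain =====

-- B replaces A's row-by-row pad-and-append construction by a two-phase
-- split-all / column-major gather; objective: simpler.

-- header.split('__'): sep "__" is nonempty, so split? is always some (exact).
def pySplit (h : String) : List String := (PySem.Str.split? h "__").getD []

-- ===== PORT A =====
-- the try/except loop: for x in range(len(arr)): append [] until index x exists
def padA (acc : List (List String)) (n : Nat) : List (List String) :=
  (List.range n).foldl (fun fh x => if x < fh.length then fh else fh ++ [[]]) acc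

-- for i, elem in enumerate(arr): final_headers[i].append(elem)
-- List.zipIdx is Python's enumerate with Nat indices (enumerate indices are ≥ 0, exact here);
-- List.modify i (· ++ [elem]) is the in-place final_headers[i].append(elem).
def stepA (acc : List (List String)) (arr : List String) : List (List String) :=
  (arr.zipIdx).foldl (fun fh p => fh.modify p.2 (· ++ [p.1])) (padA acc arr.length)

def split_headers (headers : List String) : List (List String) :=
  headers.foldl (fun fh header => stepA fh (pySplit header)) []

-- ===== PORT B =====
-- arrs = [header.split('__') for header in headers]; maxlen = max(lens, default=0);
-- [[a[i] for a in arrs if i < len(a)] for i in range(maxlen)]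
-- (the guarded comprehension is filterMap with a[i]?, which is some a[i] iff i < len a)
def split_headers_alt (headers : List String) : List (List String) :=
  let arrs := headers.map pySplit
  let maxlen := (arrs.map List.length).foldl max 0
  (List.range maxlen).map (fun i => arrs.filterMap (fun a => a[i]?))

-- ===== PRECONDITION & SPEC =====
def Spec_split_headers (headers : List String) (out : List (List String)) : Prop := out = split_headers_alt headers
instance (headers : List String) (out : List (List String)) : Decidable (Spec_split_headers headers out) := by unfold Spec_split_headers; infer_instance

-- ===== CLAIM (what is proved, stated in full; the proofs are below) =====
def Claim_equal_split_headers : Prop := ∀ (headers : List String), Dom_split_headers headers → Spec_split_headers headers (split_headers headers)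

-- ===== LEMMAS AND PROOFS =====

-- columns of a list of rows (the value split_headers_alt computes from arrs)
def colsOf (arrs : List (List String)) : List (List String) :=
  (List.range ((arrs.map List.length).foldl max 0)).map (fun i => arrs.filterMap (fun a => a[i]?))

def maxlenOf (arrs : List (List String)) : Nat := (arrs.map List.length).foldl max 0

theorem b_le_foldl_max (l : List Nat) (b : Nat) : b ≤ l.foldl max b := by
  induction l generalizing b with
  | nil => simp
  | cons a t ih => exact le_trans (le_max_left b a) (ih (max b a))

theorem le_foldl_max {l : List Nat} {x b : Nat} (hx : x ∈ l) : x ≤ l.foldl max b := by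
  induction l generalizing b with
  | nil => cases hx
  | cons a t ih =>
    rcases List.mem_cons.mp hx with rfl | h
    · exact le_trans (le_max_right b x) (b_le_foldl_max t (max b x))
    · exact ih h

theorem length_padA (acc : List (List String)) (n : Nat) :
    padA acc n = acc ++ List.replicate (n - acc.length) [] := by
  induction n with
  | zero => simp [padA]
  | succ m ih =>
    unfold padA
    rw [List.range_succ, List.foldl_append]
    show List.foldl (fun fh x => if x < fh.length then fh else fh ++ [[]]) (padA acc m) [m] = _
    simp only [List.foldl_cons, List.foldl_nil, ih]
    by_cases h : m < acc.length
    · have h1 : acc.length > m := h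
      simp [Nat.sub_eq_zero_of_le (Nat.le_of_lt h), h]
    · rw [Nat.not_lt] at h
      have hlen : (acc ++ List.replicate (m - acc.length) ([] : List String)).length = m := by
        simp [List.length_append]; omega
      rw [if_neg (by omega), List.append_assoc]
      congr 1
      rw [← List.replicate_succ']
      congr 1
      omega

-- fold of modify over zipIdx with offset k: characterization via getElem?
theorem modFold_get? (arr : List String) (k : Nat) (P : List (List String)) (j : Nat) :
    (((arr.zipIdx k).foldl (fun fh p => fh.modify p.2 (· ++ [p.1])) P))[j]? =
      if k ≤ j then (P[j]?).map (fun x => x ++ (arr[j - k]?).toList) else P[j]? := by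
  induction arr generalizing k P with
  | nil =>
    simp only [List.zipIdx, List.foldl_nil]
    split_ifs with h
    · cases P[j]? <;> simp
    · rfl
  | cons a t ih =>
    show ((t.zipIdx (k+1)).foldl _ (P.modify k (· ++ [a])))[j]? = _
    rw [ih]
    by_cases hkj : k ≤ j
    · rw [if_pos hkj]
      by_cases hjk : j = k
      · subst hjk
        rw [if_neg (by omega), List.getElem?_modify]
        cases P[j]? <;> simp
      · have hk1 : k + 1 ≤ j := by omega
        rw [if_pos hk1, List.getElem?_modify]
        have : j - k = (j - (k+1)) + 1 := by omega
        rw [this]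
        cases P[j]? <;> simp [Ne.symm hjk]
    · rw [if_neg (by omega), if_neg hkj, List.getElem?_modify]
      cases P[j]? <;> simp [show k ≠ j by omega]

theorem colsOf_get? (arrs : List (List String)) (j : Nat) :
    (colsOf arrs)[j]? = if j < maxlenOf arrs then some (arrs.filterMap (fun a => a[j]?)) else none := by
  simp [colsOf, maxlenOf, List.getElem?_map]
  split_ifs <;> simp_all

theorem length_colsOf (arrs : List (List String)) : (colsOf arrs).length = maxlenOf arrs := by
  simp [colsOf, maxlenOf]

theorem filterMap_none_of_ge (arrs : List (List String)) (j : Nat) (h : maxlenOf arrs ≤ j) :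
    arrs.filterMap (fun a => a[j]?) = [] := by
  rw [List.filterMap_eq_nil_iff]
  intro a ha
  have : a.length ≤ maxlenOf arrs := le_foldl_max (List.mem_map_of_mem ha)
  exact List.getElem?_eq_none (by omega)

theorem stepA_colsOf (arrs : List (List String)) (arr : List String) :
    stepA (colsOf arrs) arr = colsOf (arrs ++ [arr]) := by
  apply List.ext_getElem?
  intro j
  unfold stepA
  rw [modFold_get?, if_pos (Nat.zero_le j), Nat.sub_zero, length_padA,
      length_colsOf, colsOf_get?]
  have hmax : maxlenOf (arrs ++ [arr]) = max (maxlenOf arrs) arr.length := by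
    simp [maxlenOf]
  rw [hmax]
  by_cases h1 : j < maxlenOf arrs
  · rw [List.getElem?_append_left (by rw [length_colsOf]; exact h1), colsOf_get?, if_pos h1,
        if_pos (by omega), List.filterMap_append]
    cases harr : arr[j]? <;> simp [List.filterMap, harr]
  · by_cases h2 : j < arr.length
    · rw [List.getElem?_append_right (by rw [length_colsOf]; omega), length_colsOf,
          List.getElem?_replicate, if_pos (by omega), if_pos (by omega), List.filterMap_append,
          filterMap_none_of_ge arrs j (by omega)]
      cases harr : arr[j]? <;> simp [List.filterMap, harr]
    · rw [if_neg (by omega)]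
      have hn : (colsOf arrs ++ List.replicate (arr.length - maxlenOf arrs) ([] : List String))[j]? = none :=
        List.getElem?_eq_none (by simp [length_colsOf]; omega)
      rw [hn]
      rfl

theorem foldl_stepA (rest : List (List String)) (arrs : List (List String)) :
    rest.foldl stepA (colsOf arrs) = colsOf (arrs ++ rest) := by
  induction rest generalizing arrs with
  | nil => simp
  | cons a t ih =>
    simp only [List.foldl_cons, stepA_colsOf]
    rw [ih]
    simp

-- ===== VERDICT (by name: the statement is the Claim_ definition above) =====
theorem split_headers_spec : Claim_equal_split_headers := by
  intro headers _
  show split_headers headers = split_headers_alt headers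
  have hB : split_headers_alt headers = colsOf (headers.map pySplit) := rfl
  have hA : split_headers headers = (headers.map pySplit).foldl stepA [] := by
    simp [split_headers, List.foldl_map]
  have h0 : colsOf [] = [] := rfl
  rw [hA, hB, ← h0, foldl_stepA]
  simp
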